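-- pv_equiv track=rewrite | github.com/esbenwiberg/pr-guardian | src/pr_guardian/core/recent_changes.py | _group_changes_by_module
-- ===== SOURCE A (Python) =====
-- from collections import defaultdict
--
-- def _group_changes_by_module(files: list[dict]) -> dict[str, list[dict]]:
--     """Group changed files by top-level module/directory."""
--     groups: dict[str, list[dict]] = defaultdict(list)
--     for f in files:
--         path = f.get("filename", f.get("path", ""))
--         parts = path.split("/")
--         module = parts[0] if len(parts) > 1 else "(root)"
--         groups[module].append(f)
--     return dict(groups)
-- ===== SOURCE B (Python) =====
-- def _group_changes_by_module(files: list[dict]) -> dict[str, list[dict]]: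
--     """Group changed files by top-level module/directory."""
--     def module_of(f):
--         path = f.get("filename", f.get("path", ""))
--         parts = path.split("/")
--         return parts[0] if len(parts) > 1 else "(root)"
--
--     keyed = [(module_of(f), f) for f in files]
--     modules = dict.fromkeys(k for k, _ in keyed)  # distinct modules, first-occurrence order
--     return {m: [f for k, f in keyed if k == m] for m in modules}
-- ===== Notes on version B (the rewrite author's own statement) =====
-- stated objective: alternative
-- what changed: Replaces the one-pass defaultdict accumulation with a key-then-gather decomposition: compute each file's module once, take the ordered distinct modules via dict.fromkeys, and build each group by filtering the keyed list per module.
import Mathlib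
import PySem

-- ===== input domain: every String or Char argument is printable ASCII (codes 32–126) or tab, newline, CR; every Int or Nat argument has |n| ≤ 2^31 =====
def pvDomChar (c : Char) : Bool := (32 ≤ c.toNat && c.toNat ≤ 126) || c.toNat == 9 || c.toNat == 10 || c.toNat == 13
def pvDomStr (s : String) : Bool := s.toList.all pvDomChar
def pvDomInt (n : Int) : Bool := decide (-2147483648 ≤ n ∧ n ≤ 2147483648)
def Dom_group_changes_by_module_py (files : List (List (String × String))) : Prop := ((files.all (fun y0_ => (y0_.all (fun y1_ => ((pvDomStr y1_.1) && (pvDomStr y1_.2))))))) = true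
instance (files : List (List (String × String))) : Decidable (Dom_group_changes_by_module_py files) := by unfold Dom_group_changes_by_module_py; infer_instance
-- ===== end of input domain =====

-- ===== PORT A =====
-- B recomputes A's grouping by a key-then-gather decomposition instead of a one-pass defaultdict (objective: alternative).
-- shared by both ports (A computes it inline, B's `module_of` helper has the same body)
def pvModuleOf (f : List (String × String)) : String :=
  let path := (PySem.Dict.mk f).getD "filename" ((PySem.Dict.mk f).getD "path" "")
  let parts := (PySem.Str.split? path "/").getD []  -- sep is the literal "/" ≠ "", so split? is always some
  if parts.length > 1 then parts.getD 0 "" else "(root)"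

def group_changes_by_module_py (files : List (List (String × String))) : List (String × List (List (String × String))) :=
  (files.foldl
    (fun groups f => groups.modify (pvModuleOf f) [] (fun l => l ++ [f]))
    (PySem.Dict.empty : PySem.Dict String (List (List (String × String))))).items

-- ===== PORT B =====
def group_changes_by_module_py_alt (files : List (List (String × String))) : List (String × List (List (String × String))) :=
  let keyed := files.map (fun f => (pvModuleOf f, f))
  let modules := PySem.List.dedup (keyed.map (·.1))
  modules.map (fun m => (m, (keyed.filter (fun p => p.1 == m)).map (·.2)))

-- ===== PRECONDITION & SPEC =====
def Spec_group_changes_by_module_py (files : List (List (String × String))) (out : List (String × List (List (String × String)))) : Prop := out = group_changes_by_module_py_alt files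
instance (files : List (List (String × String))) (out : List (String × List (List (String × String)))) : Decidable (Spec_group_changes_by_module_py files out) := by unfold Spec_group_changes_by_module_py; infer_instance

-- ===== CLAIM (what is proved, stated in full; the proofs are below) =====
def Claim_equal_group_changes_by_module_py : Prop := ∀ (files : List (List (String × String))), Dom_group_changes_by_module_py files → Spec_group_changes_by_module_py files (group_changes_by_module_py files)

-- ===== LEMMAS AND PROOFS =====
-- A's fold over files with key `pvModuleOf f` is the generic pair-keyed grouping fold over B's keyed list.
theorem groupFold_eq_keyed (files : List (List (String × String))) :
    files.foldl
      (fun groups f => groups.modify (pvModuleOf f) [] (fun l => l ++ [f]))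
      (PySem.Dict.empty : PySem.Dict String (List (List (String × String)))) =
    (files.map (fun f => (pvModuleOf f, f))).foldl
      (fun groups p => groups.modify p.1 [] (fun l => l ++ [p.2]))
      PySem.Dict.empty := by
  rw [List.foldl_map]

theorem groupFold_keys_nodup (keyed : List (String × List (String × String))) :
    (keyed.foldl (fun groups p => groups.modify p.1 [] (fun l => l ++ [p.2]))
      (PySem.Dict.empty : PySem.Dict String (List (List (String × String))))).keys.Nodup :=
  PySem.Dict.nodup_keys_foldl_modify_key keyed (fun p => p.1) []
    (fun _ p => (fun l => l ++ [p.2])) _ PySem.Dict.nodup_keys_empty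

-- the grouping fold's keys are the distinct keys of the keyed list, in first-occurrence order
theorem groupFold_keys (keyed : List (String × List (String × String))) :
    (keyed.foldl (fun groups p => groups.modify p.1 [] (fun l => l ++ [p.2]))
      (PySem.Dict.empty : PySem.Dict String (List (List (String × String))))).keys
    = PySem.List.dedup (keyed.map (·.1)) := by
  rw [PySem.Dict.keys_foldl_modify_key]
  simp [PySem.Dict.keys_empty, PySem.Set.update, PySem.List.dedup_eq_ofList,
    PySem.Set.ofList_eq_foldl]

-- the group stored at key m is exactly the filter of the keyed list at m
theorem groupFold_getD (keyed : List (String × List (String × String))) (m : String) :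
    (keyed.foldl (fun groups p => groups.modify p.1 [] (fun l => l ++ [p.2]))
      (PySem.Dict.empty : PySem.Dict String (List (List (String × String))))).getD m []
    = (keyed.filter (fun p => p.1 == m)).map (·.2) := by
  rw [PySem.Dict.getD_foldl_modify_append]
  simp [PySem.Dict.getD_empty]

-- ===== VERDICT (by name: the statement is the Claim_ definition above) =====
theorem group_changes_by_module_py_spec : Claim_equal_group_changes_by_module_py := by
  intro files _
  simp only [Spec_group_changes_by_module_py, group_changes_by_module_py,
    group_changes_by_module_py_alt]
  rw [groupFold_eq_keyed,
    PySem.Dict.items_eq_map_keys _ (groupFold_keys_nodup _) [],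
    groupFold_keys]
  exact List.map_congr_left (fun m _ => by rw [groupFold_getD])
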